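-- pv_equiv track=rewrite | github.com/MACS-30121-25F/TT_solutions | tt3_dictionaries/soln/cfpb.py | count_by_company_by_state
-- ===== SOURCE A (Python) =====
-- def count_by_company_by_state(complaints):
--     '''
--     Computes a dict of {company: {state: count, state: count}} for all states
--         and companies
--
--     Inputs:
--         complaints (list) A list of complaints, where each complaint is a
--             dictionary
--
--     Returns: (dict) with count per company per state
--     '''
--
--     # Your code goes here
--     # replace {} with a suitable return value
--     d = {}
--     for complaint in complaints:
--         c = complaint["Company"]
--         st = complaint["State"]
--         if c not in d:
--             d[c] = {}
--         d[c][st] = d[c].get(st, 0) + 1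
--
--     return d
-- ===== SOURCE B (Python) =====
-- def count_by_company_by_state(complaints):
--     # Phase 1: flat counter keyed by (company, state)
--     counts = {}
--     for complaint in complaints:
--         key = (complaint["Company"], complaint["State"])
--         counts[key] = counts.get(key, 0) + 1
--     # Phase 2: reshape the flat counter into the nested dict
--     result = {}
--     for (company, state), n in counts.items():
--         result.setdefault(company, {})[state] = n
--     return result
-- ===== Notes on version B (the rewrite author's own statement) =====
-- stated objective: alternative
-- what changed: Replaces A's on-the-fly nested dict updates by two phases: a flat counter keyed by the (company, state) tuple, then one reshaping pass that builds the nested dict from the counter's items.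
import Mathlib
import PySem

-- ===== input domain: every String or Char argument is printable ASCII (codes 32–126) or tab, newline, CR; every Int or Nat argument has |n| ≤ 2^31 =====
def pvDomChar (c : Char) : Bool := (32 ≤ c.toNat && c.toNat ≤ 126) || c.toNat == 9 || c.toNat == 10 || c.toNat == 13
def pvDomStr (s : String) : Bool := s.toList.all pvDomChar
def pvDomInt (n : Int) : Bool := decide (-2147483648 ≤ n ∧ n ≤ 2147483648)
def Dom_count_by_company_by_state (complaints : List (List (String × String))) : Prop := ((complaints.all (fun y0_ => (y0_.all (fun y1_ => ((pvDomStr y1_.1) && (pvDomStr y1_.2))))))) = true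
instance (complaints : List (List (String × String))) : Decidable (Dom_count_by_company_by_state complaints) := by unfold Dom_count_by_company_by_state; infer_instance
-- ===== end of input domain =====

-- B replaces A's nested on-the-fly updates by a flat (company, state) counter plus one reshaping pass (alternative decomposition, same cost).

-- A-side helper: complaint[k] under the assoc-list dict convention (first match; none = KeyError, excluded by Pre_)
def pvKeyA? (complaint : List (String × String)) (k : String) : Option String :=
  (complaint.find? (fun p => p.1 == k)).map (·.2)

-- ===== PORT A =====
def count_by_company_by_state (complaints : List (List (String × String))) : List (String × List (String × Int)) :=
  let d := complaints.foldl (fun d complaint =>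
    match pvKeyA? complaint "Company", pvKeyA? complaint "State" with
    | some c, some st =>
        let d := if d.contains c then d else d.insert c PySem.Dict.empty
        let inner := d.getD c PySem.Dict.empty
        d.insert c (inner.insert st (inner.getD st (0 : Int) + 1))
    | _, _ => d) PySem.Dict.empty
  d.items.map (fun p => (p.1, p.2.items))

-- B-side helper: same dict lookup, B's own copy
def pvKeyB? (complaint : List (String × String)) (k : String) : Option String :=
  (complaint.find? (fun p => p.1 == k)).map (·.2)

-- ===== PORT B =====
def count_by_company_by_state_alt (complaints : List (List (String × String))) : List (String × List (String × Int)) :=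
  let counts := complaints.foldl (fun cnt complaint =>
    match pvKeyB? complaint "Company" with
    | none => cnt
    | some c =>
      match pvKeyB? complaint "State" with
      | none => cnt
      | some st => cnt.insert (c, st) (cnt.getD (c, st) (0 : Int) + 1)) PySem.Dict.empty
  let result := counts.items.foldl (fun r p =>
    let r := r.setdefault p.1.1 PySem.Dict.empty
    r.insert p.1.1 ((r.getD p.1.1 PySem.Dict.empty).insert p.1.2 p.2)) PySem.Dict.empty
  result.items.map (fun p => (p.1, p.2.items))

-- ===== PRECONDITION & SPEC =====
-- Pre_ excludes exactly the complaints lacking a "Company" or "State" key, on which Python A raises KeyError.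
def Pre_count_by_company_by_state (complaints : List (List (String × String))) : Prop :=
  ∀ comp ∈ complaints, "Company" ∈ comp.map Prod.fst ∧ "State" ∈ comp.map Prod.fst
instance (complaints : List (List (String × String))) : Decidable (Pre_count_by_company_by_state complaints) := by unfold Pre_count_by_company_by_state; infer_instance
def pvWitness_count_by_company_by_state : (List (List (String × String))) := [[("Company", "Acme"), ("State", "IL")], [("Company", "Acme"), ("State", "NY")]]

def Spec_count_by_company_by_state (complaints : List (List (String × String))) (out : List (String × List (String × Int))) : Prop := out = count_by_company_by_state_alt complaints
instance (complaints : List (List (String × String))) (out : List (String × List (String × Int))) : Decidable (Spec_count_by_company_by_state complaints out) := by unfold Spec_count_by_company_by_state; infer_instance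

-- ===== CLAIM (what is proved, stated in full; the proofs are below) =====
def Claim_equal_count_by_company_by_state : Prop := ∀ (complaints : List (List (String × String))), Dom_count_by_company_by_state complaints → Pre_count_by_company_by_state complaints → Spec_count_by_company_by_state complaints (count_by_company_by_state complaints)

-- ===== LEMMAS AND PROOFS =====

-- proof-side copy of the dict-lookup helper (definitionally equal to pvKeyA?/pvKeyB?)
def pvKey? (complaint : List (String × String)) (k : String) : Option String :=
  (complaint.find? (fun p => p.1 == k)).map (·.2)

def pvUpd (d : PySem.Dict String (PySem.Dict String Int)) (c st : String) (v : Int) : PySem.Dict String (PySem.Dict String Int) :=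
  d.insert c ((d.getD c PySem.Dict.empty).insert st v)

def pvStep2 (r : PySem.Dict String (PySem.Dict String Int)) (p : (String × String) × Int) : PySem.Dict String (PySem.Dict String Int) :=
  let r := r.setdefault p.1.1 PySem.Dict.empty
  r.insert p.1.1 ((r.getD p.1.1 PySem.Dict.empty).insert p.1.2 p.2)

def pvStepA (d : PySem.Dict String (PySem.Dict String Int)) (c st : String) : PySem.Dict String (PySem.Dict String Int) :=
  let d := if d.contains c then d else d.insert c PySem.Dict.empty
  let inner := d.getD c PySem.Dict.empty
  d.insert c (inner.insert st (inner.getD st (0 : Int) + 1))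

def pvBuild' (d : PySem.Dict String (PySem.Dict String Int)) (items : List ((String × String) × Int)) : PySem.Dict String (PySem.Dict String Int) :=
  items.foldl pvStep2 d

-- step2 is pvUpd
theorem pv_step2_eq (r : PySem.Dict String (PySem.Dict String Int)) (p : (String × String) × Int) :
    pvStep2 r p = pvUpd r p.1.1 p.1.2 p.2 := by
  unfold pvStep2 pvUpd
  by_cases h : r.contains p.1.1 = true
  · rw [PySem.Dict.setdefault_of_contains _ _ h]
  · simp only [Bool.not_eq_true] at h
    rw [PySem.Dict.setdefault_of_not_contains _ _ h]
    show (r.insert p.1.1 PySem.Dict.empty).insert p.1.1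
        (((r.insert p.1.1 PySem.Dict.empty).getD p.1.1 PySem.Dict.empty).insert p.1.2 p.2) = _
    rw [PySem.Dict.getD_insert_self, PySem.Dict.insert_insert_self,
        PySem.Dict.getD_of_not_contains _ _ h]

-- stepA is pvUpd of the incremented count
theorem pv_stepA_eq (d : PySem.Dict String (PySem.Dict String Int)) (c st : String) :
    pvStepA d c st = pvUpd d c st ((d.getD c PySem.Dict.empty).getD st (0 : Int) + 1) := by
  unfold pvStepA pvUpd
  by_cases h : d.contains c = true
  · simp only [h, if_true]
  · simp only [Bool.not_eq_true] at h
    simp only [h, Bool.false_eq_true, if_false]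
    show (d.insert c PySem.Dict.empty).insert c
        (((d.insert c PySem.Dict.empty).getD c PySem.Dict.empty).insert st
          (((d.insert c PySem.Dict.empty).getD c PySem.Dict.empty).getD st (0 : Int) + 1)) = _
    rw [PySem.Dict.getD_insert_self, PySem.Dict.insert_insert_self,
        PySem.Dict.getD_of_not_contains _ _ h, PySem.Dict.getD_empty]

theorem pv_insert_comm {κ ν : Type} [BEq κ] [LawfulBEq κ] (d : PySem.Dict κ ν) (k k' : κ) (v v' : ν) (hne : k ≠ k') (hk : d.contains k = true) :
    (d.insert k v).insert k' v' = (d.insert k' v').insert k v := by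
  have hk2 : (d.insert k' v').contains k = true := by
    rw [PySem.Dict.contains_insert]; simp [hk]
  by_cases hk' : d.contains k' = true
  · have hk'2 : (d.insert k v).contains k' = true := by
      rw [PySem.Dict.contains_insert]; simp [hk']
    apply PySem.Dict.ext
    rw [PySem.Dict.items_insert_of_contains _ _ hk'2,
        PySem.Dict.items_insert_of_contains _ _ hk,
        PySem.Dict.items_insert_of_contains _ _ hk2,
        PySem.Dict.items_insert_of_contains _ _ hk']
    simp only [List.map_map]
    apply List.map_congr_left
    intro p _
    simp only [Function.comp]
    by_cases h1 : p.1 = k <;> by_cases h2 : p.1 = k' <;> simp_all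
  · simp only [Bool.not_eq_true] at hk'
    have hk'2 : (d.insert k v).contains k' = false := by
      rw [PySem.Dict.contains_insert]; simp [hk', Ne.symm hne]
    apply PySem.Dict.ext
    rw [PySem.Dict.items_insert_of_not_contains _ _ hk'2,
        PySem.Dict.items_insert_of_contains _ _ hk,
        PySem.Dict.items_insert_of_contains _ _ hk2,
        PySem.Dict.items_insert_of_not_contains _ _ hk']
    rw [List.map_append]
    simp [Ne.symm hne]

-- step2 for an entry with key ≠ (c, st) commutes past an update of the (c, st) slot
theorem pv_step2_upd_comm (d : PySem.Dict String (PySem.Dict String Int)) (c st : String) (w : Int)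
    (e : (String × String) × Int) (hne : e.1 ≠ (c, st))
    (hc : d.contains c = true) (hst : (d.getD c PySem.Dict.empty).contains st = true) :
    pvStep2 (pvUpd d c st w) e = pvUpd (pvStep2 d e) c st w := by
  rw [pv_step2_eq, pv_step2_eq]
  obtain ⟨⟨c', st'⟩, v'⟩ := e
  by_cases hcc : c' = c
  · subst hcc
    have hstne : st' ≠ st := by simpa [Prod.ext_iff] using hne
    unfold pvUpd
    rw [PySem.Dict.getD_insert_self, PySem.Dict.insert_insert_self,
        PySem.Dict.getD_insert_self, PySem.Dict.insert_insert_self]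
    rw [pv_insert_comm _ st st' w v' (Ne.symm hstne) hst]
  · unfold pvUpd
    rw [PySem.Dict.getD_insert_of_ne _ _ _ hcc,
        PySem.Dict.getD_insert_of_ne _ _ _ (Ne.symm hcc)]
    exact pv_insert_comm d c c' _ _ (Ne.symm hcc) hc

theorem pv_build_upd_comm (items : List ((String × String) × Int)) (d : PySem.Dict String (PySem.Dict String Int)) (c st : String) (w : Int)
    (hmem : ∀ p ∈ items, p.1 ≠ (c, st))
    (hc : d.contains c = true) (hst : (d.getD c PySem.Dict.empty).contains st = true) :
    pvBuild' (pvUpd d c st w) items = pvUpd (pvBuild' d items) c st w := by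
  induction items generalizing d with
  | nil => rfl
  | cons e rest ih =>
    show pvBuild' (pvStep2 (pvUpd d c st w) e) rest = pvUpd (pvBuild' (pvStep2 d e) rest) c st w
    rw [pv_step2_upd_comm d c st w e (hmem e (by simp)) hc hst]
    apply ih _ (fun p hp => hmem p (by simp [hp]))
    · rw [pv_step2_eq]
      unfold pvUpd
      rw [PySem.Dict.contains_insert]
      by_cases h : c = e.1.1 <;> simp [h, hc]
    · rw [pv_step2_eq]
      unfold pvUpd
      by_cases h : e.1.1 = c
      · rw [h, PySem.Dict.getD_insert_self, PySem.Dict.contains_insert]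
        have : st ≠ e.1.2 := by
          intro hh
          exact hmem e (by simp) (by rw [hh, ← h])
        simp [hst]
      · rw [PySem.Dict.getD_insert_of_ne _ _ _ (Ne.symm h)]
        exact hst

-- pointwise: entries that never touch (c, st) leave that slot's lookup unchanged
theorem pv_build_get_untouched (items : List ((String × String) × Int)) (d : PySem.Dict String (PySem.Dict String Int)) (c st : String)
    (hmem : ∀ p ∈ items, p.1 ≠ (c, st)) :
    ((pvBuild' d items).getD c PySem.Dict.empty).get? st = ((d.getD c PySem.Dict.empty).get? st) := by
  induction items generalizing d with
  | nil => rfl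
  | cons e rest ih =>
    show ((pvBuild' (pvStep2 d e) rest).getD c PySem.Dict.empty).get? st = _
    rw [ih _ (fun p hp => hmem p (by simp [hp]))]
    rw [pv_step2_eq]
    unfold pvUpd
    by_cases h : e.1.1 = c
    · subst h
      rw [PySem.Dict.getD_insert_self]
      have : st ≠ e.1.2 := by
        intro hh
        exact hmem e (by simp) (by rw [hh])
      rw [PySem.Dict.get?_insert_of_ne _ _ this]
    · rw [PySem.Dict.getD_insert_of_ne _ _ _ (Ne.symm h)]

theorem pv_upd_upd (d : PySem.Dict String (PySem.Dict String Int)) (c st : String) (v w : Int) :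
    pvUpd (pvUpd d c st v) c st w = pvUpd d c st w := by
  unfold pvUpd
  rw [PySem.Dict.getD_insert_self, PySem.Dict.insert_insert_self, PySem.Dict.insert_insert_self]

-- incrementing an existing (c, st) key of the counter updates exactly the (c, st) slot of the reshaped dict
theorem pv_key_step (items : List ((String × String) × Int)) (c st : String) (v w : Int)
    (hnd : (items.map (·.1)).Nodup) (hmem : ((c, st), v) ∈ items) :
    pvBuild' PySem.Dict.empty (items.map (fun p => if p.1 == (c, st) then ((c, st), w) else p))
      = pvUpd (pvBuild' PySem.Dict.empty items) c st w
    ∧ ((pvBuild' PySem.Dict.empty items).getD c PySem.Dict.empty).get? st = some v := by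
  obtain ⟨l1, l2, rfl⟩ := List.append_of_mem hmem
  have hnd' := hnd
  simp only [List.map_append, List.map_cons, List.nodup_append, List.nodup_cons] at hnd'
  have h1 : ∀ p ∈ l1, p.1 ≠ (c, st) := by
    intro p hp hu
    exact hnd'.2.2 p.1 (List.mem_map_of_mem hp) (c, st) (by simp) hu
  have h2 : ∀ p ∈ l2, p.1 ≠ (c, st) := by
    intro p hp hu
    exact hnd'.2.1.1 (hu ▸ List.mem_map_of_mem hp)
  have hm1 : l1.map (fun p => if p.1 == (c, st) then ((c, st), w) else p) = l1 :=
    (List.map_congr_left (g := id) (fun p hp => by simp [h1 p hp])).trans (List.map_id l1)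
  have hm2 : l2.map (fun p => if p.1 == (c, st) then ((c, st), w) else p) = l2 :=
    (List.map_congr_left (g := id) (fun p hp => by simp [h2 p hp])).trans (List.map_id l2)
  have hsplit : ∀ (q : (String × String) × Int),
      pvBuild' PySem.Dict.empty (l1 ++ q :: l2)
        = pvBuild' (pvStep2 (pvBuild' PySem.Dict.empty l1) q) l2 := by
    intro q
    unfold pvBuild'
    rw [List.foldl_append]
    rfl
  set d1 := pvBuild' PySem.Dict.empty l1 with hd1
  have hcont_c : (pvUpd d1 c st v).contains c = true := by
    unfold pvUpd
    rw [PySem.Dict.contains_insert]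
    simp
  have hcont_st : ((pvUpd d1 c st v).getD c PySem.Dict.empty).contains st = true := by
    unfold pvUpd
    rw [PySem.Dict.getD_insert_self, PySem.Dict.contains_insert]
    simp
  constructor
  · rw [List.map_append, List.map_cons, hm1, hm2]
    simp only [beq_self_eq_true, if_true]
    rw [hsplit, hsplit, pv_step2_eq, pv_step2_eq]
    simp only
    rw [← pv_upd_upd d1 c st v w]
    rw [pv_build_upd_comm l2 _ c st w h2 hcont_c hcont_st]
  · rw [hsplit, pv_step2_eq]
    simp only
    rw [pv_build_get_untouched l2 _ c st h2]
    unfold pvUpd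
    rw [PySem.Dict.getD_insert_self, PySem.Dict.get?_insert_self]

def pvCntStep (cnt : PySem.Dict (String × String) Int) (complaint : List (String × String)) : PySem.Dict (String × String) Int :=
  match pvKey? complaint "Company", pvKey? complaint "State" with
  | some c, some st => cnt.insert (c, st) (cnt.getD (c, st) (0 : Int) + 1)
  | _, _ => cnt

theorem pv_counter_nodup (xs : List (List (String × String))) (cnt : PySem.Dict (String × String) Int)
    (h : cnt.keys.Nodup) : (xs.foldl pvCntStep cnt).keys.Nodup := by
  induction xs generalizing cnt with
  | nil => exact h
  | cons x rest ih =>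
    apply ih
    unfold pvCntStep
    cases pvKey? x "Company" <;> cases pvKey? x "State" <;>
      first
        | exact h
        | exact PySem.Dict.nodup_keys_insert _ _ _ h

theorem pv_main_core (xs : List (List (String × String))) :
    xs.foldl (fun d complaint =>
      match pvKey? complaint "Company", pvKey? complaint "State" with
      | some c, some st => pvStepA d c st
      | _, _ => d) PySem.Dict.empty
    = pvBuild' PySem.Dict.empty (xs.foldl pvCntStep PySem.Dict.empty).items := by
  induction xs using List.reverseRecOn with
  | nil => rfl
  | append_singleton xs x ih =>
    rw [List.foldl_append, List.foldl_append]
    simp only [List.foldl_cons, List.foldl_nil]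
    rw [ih]
    set cnt := xs.foldl pvCntStep PySem.Dict.empty with hcnt
    have hnd : cnt.keys.Nodup := pv_counter_nodup xs _ PySem.Dict.nodup_keys_empty
    unfold pvCntStep
    cases hC : pvKey? x "Company" with
    | none => rfl
    | some c =>
      cases hS : pvKey? x "State" with
      | none => rfl
      | some st =>
        simp only
        by_cases hk : cnt.contains (c, st) = true
        · obtain ⟨v, hv⟩ : ∃ v, cnt.get? (c, st) = some v := by
            rcases hg : cnt.get? (c, st) with _ | v
            · rw [PySem.Dict.contains_eq_isSome_get?, hg] at hk
              simp at hk
            · exact ⟨v, rfl⟩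
          have hgd : cnt.getD (c, st) (0 : Int) = v := PySem.Dict.getD_of_get?_eq_some _ _ hv
          have hmem : ((c, st), v) ∈ cnt.items := PySem.Dict.mem_items_of_get?_eq_some _ hv
          have hks := pv_key_step cnt.items c st v (cnt.getD (c, st) (0 : Int) + 1) hnd hmem
          rw [PySem.Dict.items_insert_of_contains _ _ hk, hks.1, pv_stepA_eq]
          rw [PySem.Dict.getD_eq_get?_getD, hks.2]
          simp [hgd]
        · simp only [Bool.not_eq_true] at hk
          rw [PySem.Dict.items_insert_of_not_contains _ _ hk]
          have hfresh : ∀ p ∈ cnt.items, p.1 ≠ (c, st) := by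
            intro p hp he
            have := PySem.Dict.mem_keys_of_mem_items _ hp
            rw [he, ← PySem.Dict.contains_iff_mem_keys, hk] at this
            exact absurd this (by simp)
          have : pvBuild' PySem.Dict.empty (cnt.items ++ [((c, st), cnt.getD (c, st) (0 : Int) + 1)])
              = pvStep2 (pvBuild' PySem.Dict.empty cnt.items) ((c, st), cnt.getD (c, st) (0 : Int) + 1) := by
            unfold pvBuild'
            rw [List.foldl_append]
            rfl
          rw [this, pv_step2_eq, pv_stepA_eq]
          rw [PySem.Dict.getD_eq_get?_getD, pv_build_get_untouched cnt.items _ c st hfresh]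
          rw [PySem.Dict.getD_empty, PySem.Dict.get?_empty]
          rw [PySem.Dict.getD_of_not_contains _ _ hk]
          rfl


theorem pv_main (xs : List (List (String × String))) :
    xs.foldl (fun d complaint =>
      match pvKeyA? complaint "Company", pvKeyA? complaint "State" with
      | some c, some st =>
          let d := if d.contains c then d else d.insert c PySem.Dict.empty
          let inner := d.getD c PySem.Dict.empty
          d.insert c (inner.insert st (inner.getD st (0 : Int) + 1))
      | _, _ => d) PySem.Dict.empty
    = pvBuild' PySem.Dict.empty
        (xs.foldl (fun cnt complaint =>
          match pvKeyB? complaint "Company" with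
          | none => cnt
          | some c =>
            match pvKeyB? complaint "State" with
            | none => cnt
            | some st => cnt.insert (c, st) (cnt.getD (c, st) (0 : Int) + 1)) PySem.Dict.empty).items := by
  have e1 : (fun (d : PySem.Dict String (PySem.Dict String Int)) complaint =>
      match pvKeyA? complaint "Company", pvKeyA? complaint "State" with
      | some c, some st =>
          let d := if d.contains c then d else d.insert c PySem.Dict.empty
          let inner := d.getD c PySem.Dict.empty
          d.insert c (inner.insert st (inner.getD st (0 : Int) + 1))
      | _, _ => d)
      = (fun d complaint =>
      match pvKey? complaint "Company", pvKey? complaint "State" with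
      | some c, some st => pvStepA d c st
      | _, _ => d) := by
    funext d complaint
    show (match pvKeyA? complaint "Company", pvKeyA? complaint "State" with
      | some c, some st =>
          let d := if d.contains c then d else d.insert c PySem.Dict.empty
          let inner := d.getD c PySem.Dict.empty
          d.insert c (inner.insert st (inner.getD st (0 : Int) + 1))
      | _, _ => d) = _
    rw [show pvKeyA? = pvKey? from rfl]
    cases pvKey? complaint "Company" <;> cases pvKey? complaint "State" <;> rfl
  have e2 : (fun (cnt : PySem.Dict (String × String) Int) complaint =>
      match pvKeyB? complaint "Company" with
      | none => cnt
      | some c =>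
        match pvKeyB? complaint "State" with
        | none => cnt
        | some st => cnt.insert (c, st) (cnt.getD (c, st) (0 : Int) + 1)) = pvCntStep := by
    funext cnt complaint
    show (match pvKeyB? complaint "Company" with
      | none => cnt
      | some c =>
        match pvKeyB? complaint "State" with
        | none => cnt
        | some st => cnt.insert (c, st) (cnt.getD (c, st) (0 : Int) + 1)) = pvCntStep cnt complaint
    rw [show pvKeyB? = pvKey? from rfl]
    unfold pvCntStep
    cases pvKey? complaint "Company" <;> cases pvKey? complaint "State" <;> rfl
  rw [e1, e2]
  exact pv_main_core xs

-- ===== VERDICT (by name: the statement is the Claim_ definition above) =====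
theorem count_by_company_by_state_spec : Claim_equal_count_by_company_by_state := by
  intro complaints _ _
  unfold Spec_count_by_company_by_state count_by_company_by_state count_by_company_by_state_alt
  rw [pv_main complaints]
  rfl
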